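-- pv_equiv track=rewrite | github.com/MartinAvendanoQ/Proyectofinal | codigo_del_jefe.py | palabra_ingresada
-- ===== SOURCE A (Python) =====
-- def palabra_ingresada(letra,palabra,letras_ingresadas):
--
--     letras_ingresadas.append(letra.lower())  # add the letter entered by user to string letras_ingresadas and convert it into lowercase
--
--     palabra_ingresada = ""  #the set of letters that the user has guessed (at the begining with no characters)
--
--     for con in palabra:   #loop for that runs over the length of the variable palabra
--         if con in letras_ingresadas:   # if each letter in palabra coincides with the list of letras_ingresadas, copy con to palabra_ingresada. In other case, print underscore
--             palabra_ingresada += con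
--         else:
--             palabra_ingresada += "_"
--
--     return palabra_ingresada  #return the guessed word up to the moment
-- ===== SOURCE B (Python) =====
-- def palabra_ingresada(letra, palabra, letras_ingresadas):
--     letras_ingresadas.append(letra.lower())  # same in-place mutation as the original
--
--     resultado = ["_"] * len(palabra)  # start fully hidden
--     for g in letras_ingresadas:       # reveal each guessed letter across the word
--         resultado = [c if c == g else r for c, r in zip(palabra, resultado)]
--
--     return "".join(resultado)
-- ===== Notes on version B (the rewrite author's own statement) =====
-- stated objective: alternative
-- what changed: A scans the word once testing each character's membership in the guess list; B starts from an all-underscore display and makes one reveal pass per guessed letter over the word (zip rebuild), inverting the traversal.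
import Mathlib
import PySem

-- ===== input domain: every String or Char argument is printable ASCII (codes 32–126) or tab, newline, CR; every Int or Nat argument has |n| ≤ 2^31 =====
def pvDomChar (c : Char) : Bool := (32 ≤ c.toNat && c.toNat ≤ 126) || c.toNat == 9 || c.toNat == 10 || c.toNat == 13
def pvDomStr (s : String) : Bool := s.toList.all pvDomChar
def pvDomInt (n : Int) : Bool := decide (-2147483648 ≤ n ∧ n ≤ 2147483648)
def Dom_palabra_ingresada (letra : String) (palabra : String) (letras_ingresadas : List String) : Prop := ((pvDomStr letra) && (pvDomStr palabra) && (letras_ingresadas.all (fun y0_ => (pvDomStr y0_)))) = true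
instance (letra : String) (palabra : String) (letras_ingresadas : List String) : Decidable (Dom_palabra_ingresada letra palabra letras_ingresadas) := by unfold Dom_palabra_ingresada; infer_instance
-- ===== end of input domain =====

-- B replaces A's per-character membership scan of the word by a reveal pass per guessed
-- letter over an initially hidden word (objective: alternative decomposition, same cost).
-- Both A and B append letra.lower() to letras_ingresadas in place (same mutation);
-- the equivalence proved here is about the return value.

-- ===== PORT A =====
-- A: append lowered letter, then scan the word, testing each character's membership
-- in the guess list, concatenating the character or "_".
def palabra_ingresada (letra : String) (palabra : String) (letras_ingresadas : List String) : String :=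
  let li := letras_ingresadas ++ [PySem.Str.lower letra]
  palabra.toList.foldl
    (fun acc con =>
      if li.contains (String.singleton con) then acc ++ String.singleton con
      else acc ++ "_") ""

-- ===== PORT B =====
-- B: start from all underscores; for each guessed letter rebuild the display,
-- revealing every position of the word that equals that guess (zip pass).
def palabra_ingresada_alt (letra : String) (palabra : String) (letras_ingresadas : List String) : String :=
  let li := letras_ingresadas ++ [PySem.Str.lower letra]
  let w := palabra.toList
  let resultado :=
    li.foldl
      (fun r g => (w.zip r).map (fun cr => if String.singleton cr.1 == g then cr.1 else cr.2))
      (List.replicate w.length '_')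
  String.ofList resultado

-- ===== PRECONDITION & SPEC =====
def Spec_palabra_ingresada (letra : String) (palabra : String) (letras_ingresadas : List String) (out : String) : Prop := out = palabra_ingresada_alt letra palabra letras_ingresadas
instance (letra : String) (palabra : String) (letras_ingresadas : List String) (out : String) : Decidable (Spec_palabra_ingresada letra palabra letras_ingresadas out) := by unfold Spec_palabra_ingresada; infer_instance

-- ===== CLAIM (what is proved, stated in full; the proofs are below) =====
def Claim_equal_palabra_ingresada : Prop := ∀ (letra : String) (palabra : String) (letras_ingresadas : List String), Dom_palabra_ingresada letra palabra letras_ingresadas → Spec_palabra_ingresada letra palabra letras_ingresadas (palabra_ingresada letra palabra letras_ingresadas)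

-- ===== LEMMAS AND PROOFS =====

theorem pv_append_cons (s : String) (c : Char) (l : List Char) :
    s ++ String.ofList (c :: l) = (s ++ String.singleton c) ++ String.ofList l := by
  apply String.ext
  simp [String.singleton]

theorem pv_append_underscore (s : String) (l : List Char) :
    s ++ String.ofList ('_' :: l) = (s ++ "_") ++ String.ofList l := by
  apply String.ext
  simp

-- A's loop: appending (character or "_") per word character is the String.ofList of a map.
theorem pvA_fold (q : Char → Bool) :
    ∀ (w : List Char) (s : String),
      w.foldl (fun acc con => if q con then acc ++ String.singleton con else acc ++ "_") s
        = s ++ String.ofList (w.map (fun c => if q c then c else '_')) := by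
  intro w
  induction w with
  | nil => intro s; apply String.ext; simp
  | cons c w ih =>
    intro s
    by_cases h : q c = true
    · rw [List.map_cons, if_pos h, pv_append_cons, List.foldl_cons, if_pos h, ih]
    · rw [List.map_cons, if_neg h, pv_append_underscore, List.foldl_cons, if_neg h, ih]

theorem pv_zip_self_map (f : Char → Char) :
    ∀ (w : List Char), w.zip (w.map f) = w.map (fun c => (c, f c)) := by
  intro w
  induction w with
  | nil => simp
  | cons c w ih => simp [ih]

-- B's loop invariant: each reveal pass, applied to a pointwise display of the word,
-- ors the guess into the pointwise predicate.
theorem pvB_fold :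
    ∀ (gs : List String) (w : List Char) (p : Char → Bool),
      gs.foldl
        (fun r g => (w.zip r).map (fun cr => if String.singleton cr.1 == g then cr.1 else cr.2))
        (w.map (fun c => if p c then c else '_'))
        = w.map (fun c => if p c || gs.contains (String.singleton c) then c else '_') := by
  intro gs
  induction gs with
  | nil => intro w p; simp
  | cons g gs ih =>
    intro w p
    have hstep :
        (w.zip (w.map (fun c => if p c then c else '_'))).map
            (fun cr => if String.singleton cr.1 == g then cr.1 else cr.2)
          = w.map (fun c => if (p c || (String.singleton c == g)) then c else '_') := by
      rw [pv_zip_self_map, List.map_map]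
      refine List.map_congr_left ?_
      intro c _
      by_cases hp : p c = true <;> by_cases hg : String.singleton c = g <;>
        simp [hp, hg]
    simp only [List.foldl_cons, hstep, ih]
    refine List.map_congr_left ?_
    intro c _
    simp [Bool.or_assoc]

-- A and B both compute the pointwise reveal of the word by the full guess list.
theorem pv_main (letra palabra : String) (letras_ingresadas : List String) :
    palabra_ingresada letra palabra letras_ingresadas
      = palabra_ingresada_alt letra palabra letras_ingresadas := by
  simp only [palabra_ingresada, palabra_ingresada_alt]
  have hrep : List.replicate palabra.toList.length '_'
      = palabra.toList.map (fun c => if (false : Bool) then c else '_') := by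
    simp
  rw [pvA_fold (fun c =>
      (letras_ingresadas ++ [PySem.Str.lower letra]).contains (String.singleton c))
      palabra.toList "", hrep,
    pvB_fold (letras_ingresadas ++ [PySem.Str.lower letra]) palabra.toList (fun _ => false)]
  apply String.ext
  simp

-- ===== VERDICT (by name: the statement is the Claim_ definition above) =====
theorem palabra_ingresada_spec : Claim_equal_palabra_ingresada := by
  intro letra palabra li _
  unfold Spec_palabra_ingresada
  exact pv_main letra palabra li
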